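-- pv_equiv track=rewrite | github.com/swjtu-dev-squad/socitwin | oasis_dashboard/persona_llm_batch.py | _outer_array_bounds
-- ===== SOURCE A (Python) =====
-- def _outer_array_bounds(s: str) -> tuple[int, int] | None:
--     """定位最外层 JSON 数组的 [ 与匹配的 ]，忽略字符串内的括号。"""
--     start = s.find("[")
--     if start < 0:
--         return None
--     depth = 0
--     in_string = False
--     escape = False
--     i = start
--     while i < len(s):
--         c = s[i]
--         if in_string:
--             if escape:
--                 escape = False
--             elif c == "\\":
--                 escape = True
--             elif c == '"':
--                 in_string = False
--             i += 1
--             continue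
--         if c == '"':
--             in_string = True
--         elif c == "[":
--             depth += 1
--         elif c == "]":
--             depth -= 1
--             if depth == 0:
--                 return start, i
--         i += 1
--     return None
-- ===== SOURCE B (Python) =====
-- def _outer_array_bounds(s: str):
--     """Two-pass variant: first mask out string literals, then match brackets."""
--     start = s.find("[")
--     if start < 0:
--         return None
--     # Pass 1: collect (index, char) for positions outside string literals.
--     active = []
--     in_string = False
--     escape = False
--     for i in range(start, len(s)):
--         c = s[i]
--         if in_string:
--             if escape:
--                 escape = False
--             elif c == "\\":
--                 escape = True
--             elif c == '"':
--                 in_string = False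
--         elif c == '"':
--             in_string = True
--         else:
--             active.append((i, c))
--     # Pass 2: bracket matching over active positions only.
--     depth = 0
--     for i, c in active:
--         if c == "[":
--             depth += 1
--         elif c == "]":
--             depth -= 1
--             if depth == 0:
--                 return start, i
--     return None
-- ===== Notes on version B (the rewrite author's own statement) =====
-- stated objective: alternative
-- what changed: A's single fused scan (string-state and bracket depth tracked together) is split into two differently-shaped passes: pass 1 builds the list of (index, char) positions lying outside string literals, pass 2 walks only that list matching brackets.
import Mathlib
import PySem

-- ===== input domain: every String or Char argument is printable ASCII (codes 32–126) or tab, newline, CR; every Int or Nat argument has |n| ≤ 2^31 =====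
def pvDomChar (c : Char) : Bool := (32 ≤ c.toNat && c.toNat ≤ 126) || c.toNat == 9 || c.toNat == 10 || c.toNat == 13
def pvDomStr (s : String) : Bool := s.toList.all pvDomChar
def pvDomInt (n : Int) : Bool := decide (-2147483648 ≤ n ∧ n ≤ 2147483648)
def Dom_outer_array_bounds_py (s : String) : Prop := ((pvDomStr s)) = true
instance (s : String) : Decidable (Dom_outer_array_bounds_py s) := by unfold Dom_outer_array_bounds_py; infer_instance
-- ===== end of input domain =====

-- B separates A's single combined scan into two passes (string-masking, then bracket
-- matching over the unmasked positions); objective: alternative decomposition, same cost.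

-- ===== PORT A =====
-- A's while loop from i = start, state (depth, in_string, escape, i); branches in A's order.
def pvALoop (l : List Char) (depth : Int) (inStr esc : Bool) (i start : Int) :
    Option (Int × Int) :=
  match l with
  | [] => none
  | c :: rest =>
    if inStr then
      if esc then pvALoop rest depth inStr false (i+1) start
      else if c = '\\' then pvALoop rest depth inStr true (i+1) start
      else if c = '"' then pvALoop rest depth false esc (i+1) start
      else pvALoop rest depth inStr esc (i+1) start
    else
      if c = '"' then pvALoop rest depth true esc (i+1) start
      else if c = '[' then pvALoop rest (depth+1) inStr esc (i+1) start
      else if c = ']' then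
        if depth - 1 = 0 then some (start, i)
        else pvALoop rest (depth-1) inStr esc (i+1) start
      else pvALoop rest depth inStr esc (i+1) start

def outer_array_bounds_py (s : String) : Option (Int × Int) :=
  let start := PySem.Str.find s "["
  if start < 0 then none
  else pvALoop (s.toList.drop start.toNat) 0 false false start start

-- ===== PORT B =====
-- Pass 1 of Source B: collect (index, char) for positions outside string literals.
def pvMask (l : List Char) (inStr esc : Bool) (i : Int) : List (Int × Char) :=
  match l with
  | [] => []
  | c :: rest =>
    if inStr then
      if esc then pvMask rest inStr false (i+1)
      else if c = '\\' then pvMask rest inStr true (i+1)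
      else if c = '"' then pvMask rest false esc (i+1)
      else pvMask rest inStr esc (i+1)
    else if c = '"' then pvMask rest true esc (i+1)
    else (i, c) :: pvMask rest inStr esc (i+1)

-- Pass 2 of Source B: bracket matching over the active positions only.
def pvMatch (l : List (Int × Char)) (depth start : Int) : Option (Int × Int) :=
  match l with
  | [] => none
  | (i, c) :: rest =>
    if c = '[' then pvMatch rest (depth+1) start
    else if c = ']' then
      if depth - 1 = 0 then some (start, i)
      else pvMatch rest (depth-1) start
    else pvMatch rest depth start

def outer_array_bounds_py_alt (s : String) : Option (Int × Int) :=
  let start := PySem.Str.find s "["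
  if start < 0 then none
  else pvMatch (pvMask (s.toList.drop start.toNat) false false start) 0 start

-- ===== PRECONDITION & SPEC =====
def Spec_outer_array_bounds_py (s : String) (out : Option (Int × Int)) : Prop := out = outer_array_bounds_py_alt s
instance (s : String) (out : Option (Int × Int)) : Decidable (Spec_outer_array_bounds_py s out) := by unfold Spec_outer_array_bounds_py; infer_instance

-- ===== CLAIM (what is proved, stated in full; the proofs are below) =====
def Claim_equal_outer_array_bounds_py : Prop := ∀ (s : String), Dom_outer_array_bounds_py s → Spec_outer_array_bounds_py s (outer_array_bounds_py s)

-- ===== LEMMAS AND PROOFS =====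
-- A's fused scan equals bracket-matching over the masked position list, for every state.
theorem pvALoop_eq_match_mask (l : List Char) :
    ∀ (depth : Int) (inStr esc : Bool) (i start : Int),
      pvALoop l depth inStr esc i start = pvMatch (pvMask l inStr esc i) depth start := by
  induction l with
  | nil => intro depth inStr esc i start; simp [pvALoop, pvMask, pvMatch]
  | cons c rest ih =>
    intro depth inStr esc i start
    cases inStr <;> cases esc <;>
      simp only [pvALoop, pvMask] <;>
      split_ifs <;> first
        | exact ih _ _ _ _ _
        | simp_all [pvMatch]

-- ===== VERDICT (by name: the statement is the Claim_ definition above) =====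
theorem outer_array_bounds_py_spec : Claim_equal_outer_array_bounds_py := by
  intro s _
  unfold Spec_outer_array_bounds_py outer_array_bounds_py outer_array_bounds_py_alt
  simp only []
  split_ifs
  · rfl
  · exact pvALoop_eq_match_mask _ _ _ _ _ _
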